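-- pv_equiv track=rewrite | github.com/Mxbach/AoC24 | Day 02/const_inc_dec.py | two_star
-- ===== SOURCE A (Python) =====
-- def valid_list(l: list[int]) -> bool:
--     if not (l == list(sorted(l, reverse=True)) or l == list(sorted(l))):
--         return False
--
--     dist = True
--     for i in range(1, len(l)):
--         if not (1 <= abs(l[i-1] - l[i]) <= 3):
--             dist = False
--
--     return dist
--
-- def two_star(l: list[list[int]]):
--     valid = 0
--     for i in l:
--         if valid_list(i):
--             valid += 1
--         else:
--             res = []
--             for j in range(len(i)):
--                 cp = i.copy()
--                 cp.pop(j)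
--                 res.append(valid_list(cp))
--
--             if True in res:
--                 valid += 1
--     return valid
-- ===== SOURCE B (Python) =====
-- def _ok(d):
--     # a report is safe iff its adjacent differences are all in [1,3] or all in [-3,-1]
--     return all(1 <= x <= 3 for x in d) or all(-3 <= x <= -1 for x in d)
--
--
-- def _drop(d, k):
--     # difference list of the report with element k removed: dropping an end
--     # element drops one difference, dropping a middle element merges two
--     if k == 0:
--         return d[1:]
--     if k == len(d):
--         return d[:-1]
--     return d[:k-1] + [d[k-1] + d[k]] + d[k+1:]
--
--
-- def two_star(l: list[list[int]]):
--     valid = 0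
--     for r in l:
--         d = [b - a for a, b in zip(r, r[1:])]
--         if _ok(d) or any(_ok(_drop(d, k)) for k in range(len(r))):
--             valid += 1
--     return valid
-- ===== Notes on version B (the rewrite author's own statement) =====
-- stated objective: faster
-- what changed: B works entirely in the difference domain: each report is reduced once to its list of adjacent gaps, a report is safe iff the gaps are all in [1,3] or all in [-3,-1], and removing an element is simulated by dropping or merging gaps, so A's per-candidate double sort and full-list copies disappear.
import Mathlib
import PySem

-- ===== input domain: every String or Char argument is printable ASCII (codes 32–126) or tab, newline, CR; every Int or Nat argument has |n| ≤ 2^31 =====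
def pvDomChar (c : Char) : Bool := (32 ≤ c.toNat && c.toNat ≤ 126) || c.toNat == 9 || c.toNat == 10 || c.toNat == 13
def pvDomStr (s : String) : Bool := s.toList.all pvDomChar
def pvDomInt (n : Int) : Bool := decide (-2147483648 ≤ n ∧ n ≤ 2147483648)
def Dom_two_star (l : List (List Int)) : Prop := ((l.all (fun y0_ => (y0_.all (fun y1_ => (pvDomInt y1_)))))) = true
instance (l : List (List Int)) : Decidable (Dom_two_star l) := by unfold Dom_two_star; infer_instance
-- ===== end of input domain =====

-- B re-implements the count in the difference domain (adjacent gaps, merged on removal) instead of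
-- sorting each candidate sublist twice; same return value, no sorting or copying (measured faster in a timing run).

-- ===== PORT A =====
-- valid_list: 'l == sorted(l, reverse=True) or l == sorted(l)', then the distance flag loop.
-- pyGetD is exact here: the loop indices i ∈ range(1, len(l)) keep i-1 and i in range.
def valid_list (l : List Int) : Bool :=
  if !((l == PySem.List.sorted l (fun x => x) true) || (l == PySem.List.sorted l (fun x => x))) then
    false
  else
    (PySem.List.pyRange 1 (l.length : Int)).foldl
      (fun dist i =>
        if !(decide (1 ≤ |PySem.List.pyGetD l (i - 1) 0 - PySem.List.pyGetD l i 0| ∧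
                     |PySem.List.pyGetD l (i - 1) 0 - PySem.List.pyGetD l i 0| ≤ 3)) then false
        else dist)
      true

def two_star (l : List (List Int)) : Int :=
  l.foldl
    (fun valid i =>
      if valid_list i then valid + 1
      else
        let res := (PySem.List.pyRange 0 (i.length : Int)).foldl
          (fun res j =>
            -- cp = i.copy(); cp.pop(j)  — j ∈ range(len(i)), so pop? is always some
            let cp := match PySem.List.pop? i j with
                      | some (_, rest) => rest
                      | none => i
            res ++ [valid_list cp]) []
        if res.contains true then valid + 1 else valid)
    0

-- ===== PORT B =====
def pvOk (d : List Int) : Bool :=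
  d.all (fun x => decide (1 ≤ x ∧ x ≤ 3)) || d.all (fun x => decide (-3 ≤ x ∧ x ≤ -1))

-- pyGetD is exact here: the middle branch has 0 < k < len(d), so k-1 and k are in range.
def pvDrop (d : List Int) (k : Int) : List Int :=
  if k == 0 then PySem.List.slice d (some 1) none
  else if k == (d.length : Int) then PySem.List.slice d none (some (-1))
  else PySem.List.slice d none (some (k - 1)) ++
       [PySem.List.pyGetD d (k - 1) 0 + PySem.List.pyGetD d k 0] ++
       PySem.List.slice d (some (k + 1)) none

def two_star_alt (l : List (List Int)) : Int :=
  l.foldl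
    (fun valid r =>
      let d := (r.zip (PySem.List.slice r (some 1) none)).map (fun p => p.2 - p.1)
      if pvOk d || (PySem.List.pyRange 0 (r.length : Int)).any (fun k => pvOk (pvDrop d k)) then
        valid + 1
      else valid)
    0

-- ===== PRECONDITION & SPEC =====
def Spec_two_star (l : List (List Int)) (out : Int) : Prop := out = two_star_alt l
instance (l : List (List Int)) (out : Int) : Decidable (Spec_two_star l out) := by unfold Spec_two_star; infer_instance

-- ===== CLAIM (what is proved, stated in full; the proofs are below) =====
def Claim_equal_two_star : Prop := ∀ (l : List (List Int)), Dom_two_star l → Spec_two_star l (two_star l)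

-- ===== LEMMAS AND PROOFS =====

-- proof-side normal form of B's difference list
def pvDiffs (r : List Int) : List Int := (r.zip r.tail).map (fun p => p.2 - p.1)

-- Nat-level normal form of pvDrop
def pvDropNat (d : List Int) (n : Nat) : List Int :=
  if n = 0 then d.tail
  else if n = d.length then d.dropLast
  else d.take (n - 1) ++ [d.getD (n - 1) 0 + d.getD n 0] ++ d.drop (n + 1)

theorem pvDrop_natCast (d : List Int) (n : Nat) : pvDrop d (n : Int) = pvDropNat d n := by
  unfold pvDrop pvDropNat
  by_cases h0 : n = 0
  · subst h0; simp [PySem.List.slice_from_one]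
  · rw [if_neg (by simp [h0]), if_neg h0]
    by_cases hl : n = d.length
    · subst hl; simp [PySem.List.slice_to_neg_one]
    · rw [if_neg (by simpa using hl), if_neg hl]
      have h1 : ((n : Int) - 1) = ((n - 1 : Nat) : Int) := by omega
      have h2 : ((n : Int) + 1) = ((n + 1 : Nat) : Int) := by omega
      rw [h1, h2, PySem.List.slice_to_natCast, PySem.List.slice_from_natCast,
          PySem.List.pyGetD_natCast, PySem.List.pyGetD_natCast]

theorem pvDiffs_eraseIdx (r : List Int) (n : Nat) (h : n < r.length) :
    pvDiffs (r.eraseIdx n) = pvDropNat (pvDiffs r) n := by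
  induction r generalizing n with
  | nil => simp at h
  | cons a t ih =>
    cases n with
    | zero =>
      cases t with
      | nil => simp [pvDiffs, pvDropNat]
      | cons b t' => simp [pvDiffs, pvDropNat]
    | succ m =>
      cases t with
      | nil => simp at h
      | cons b t' =>
        cases m with
        | zero =>
          cases t' with
          | nil => simp [pvDiffs, pvDropNat]
          | cons c t'' =>
            simp [pvDiffs, pvDropNat, List.getD]
        | succ m' =>
          have hm : m' + 1 < (b :: t').length := by simpa using h
          have hIH := ih (n := m' + 1) hm
          have hne : pvDiffs (b :: t') ≠ [] := by
            cases t' with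
            | nil => simp at hm
            | cons c t'' => simp [pvDiffs]
          simp only [List.eraseIdx_cons_succ, pvDiffs, List.tail_cons] at *
          cases t' with
          | nil => simp at hm
          | cons c t'' =>
            simp only [List.zip_cons_cons, List.map_cons] at *
            unfold pvDropNat at *
            by_cases hend : m' + 1 = ((List.zip (c :: t'') t'').map (fun p => p.2 - p.1)).length + 1
            · rw [if_neg (by omega), if_pos (by simpa using hend)]
              rw [if_neg (by omega), if_pos (by simpa using hend)] at hIH
              rw [List.dropLast_cons_of_ne_nil (by simpa [pvDiffs] using hne)]
              rw [hIH]
            · rw [if_neg (by omega), if_neg (by simpa using hend)]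
              rw [if_neg (by omega), if_neg (by simpa using hend)] at hIH
              simp only [Nat.add_sub_cancel] at hIH ⊢
              simp only [List.take_succ_cons, List.getD_cons_succ, List.drop_succ_cons,
                List.cons_append] at hIH ⊢
              rw [hIH]

-- the zip-of-adjacent-pairs view of a Pairwise test
theorem zip_all_isChain (R : Int → Int → Prop) [DecidableRel R] (r : List Int) :
    (r.zip r.tail).all (fun q => decide (R q.1 q.2)) = decide (List.IsChain R r) := by
  induction r with
  | nil => simp
  | cons a t ih =>
    cases t with
    | nil => simp
    | cons b t' =>
      simp only [List.tail_cons, List.zip_cons_cons, List.all_cons] at *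
      rw [ih]
      simp [List.isChain_cons_cons]

theorem sortedAsc_eq (r : List Int) :
    (r == PySem.List.sorted r (fun x => x)) = decide (r.Pairwise (· ≤ ·)) := by
  rw [Bool.eq_iff_iff]
  simp only [beq_iff_eq, decide_eq_true_eq]
  constructor
  · intro h; rw [h]; exact PySem.List.sorted_pairwise r (fun x => x)
  · intro h; exact (PySem.List.sorted_eq_self_of_pairwise r (fun x => x) h).symm

theorem sortedDesc_eq (r : List Int) :
    (r == PySem.List.sorted r (fun x => x) true) = decide (r.Pairwise (fun a b => b ≤ a)) := by
  rw [Bool.eq_iff_iff]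
  simp only [beq_iff_eq, decide_eq_true_eq]
  constructor
  · intro h; rw [h]; exact PySem.List.sorted_pairwise_rev r (fun x => x)
  · intro h; exact (PySem.List.sorted_rev_eq_self_of_pairwise r (fun x => x) h).symm

theorem all_congr_mem' {α : Type} (l : List α) (p q : α → Bool)
    (h : ∀ x ∈ l, p x = q x) : l.all p = l.all q := by
  induction l with
  | nil => rfl
  | cons a t ih =>
    simp only [List.all_cons, h a (by simp)]
    rw [ih (fun x hx => h x (by simp [hx]))]

theorem range_adj_nat (p : Int → Int → Bool) (a : Int) (t : List Int) :
    (List.range t.length).all (fun k => p ((a :: t).getD k 0) ((a :: t).getD (k + 1) 0)) =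
      ((a :: t).zip t).all (fun q => p q.1 q.2) := by
  induction t generalizing a with
  | nil => simp
  | cons b t' ih =>
    rw [List.length_cons, List.range_succ_eq_map]
    simp only [List.all_cons, List.all_map, Function.comp_def, Nat.succ_eq_add_one,
      List.getD_cons_succ, List.getD_cons_zero, List.zip_cons_cons]
    simp only [List.getD_cons_succ] at ih
    rw [ih b]

theorem pyRange_one_shift (n : Nat) :
    PySem.List.pyRange 1 ((n + 1 : Nat) : Int) =
      (List.range n).map (fun k => ((k + 1 : Nat) : Int)) := by
  have h := PySem.List.pyRange_zero_natCast (n + 1)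
  rw [PySem.List.pyRange_one_cons (by exact_mod_cast Nat.succ_pos n), List.range_succ_eq_map,
    List.map_cons] at h
  injection h with h1 h2
  have h01 : (0 : Int) + 1 = 1 := by norm_num
  rw [h01] at h2
  rw [h2, List.map_map]
  rfl

theorem range_adj (p : Int → Int → Bool) (r : List Int) :
    (PySem.List.pyRange 1 (r.length : Int)).all
        (fun i => p (PySem.List.pyGetD r (i - 1) 0) (PySem.List.pyGetD r i 0)) =
      (r.zip r.tail).all (fun q => p q.1 q.2) := by
  cases r with
  | nil => simp [PySem.List.pyRange]
  | cons a t =>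
    rw [List.length_cons, pyRange_one_shift, List.all_map]
    rw [List.tail_cons, ← range_adj_nat p a t]
    apply all_congr_mem'
    intro k _
    have h1 : (((k + 1 : Nat) : Int) - 1) = ((k : Nat) : Int) := by push_cast; ring
    simp only [Function.comp_apply, h1, PySem.List.pyGetD_natCast]

theorem all_and_split (l : List (Int × Int)) (p q : Int × Int → Bool) :
    (l.all fun a => p a && q a) = (l.all p && l.all q) := by
  induction l with
  | nil => rfl
  | cons a t ih =>
    simp only [List.all_cons, ih]
    cases p a <;> cases q a <;> simp

-- valid_list computes exactly B's gap test on the difference list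
theorem valid_list_eq_pvOk (r : List Int) : valid_list r = pvOk (pvDiffs r) := by
  have hloop :
      (PySem.List.pyRange 1 (r.length : Int)).foldl
        (fun dist i =>
          if !(decide (1 ≤ |PySem.List.pyGetD r (i - 1) 0 - PySem.List.pyGetD r i 0| ∧
                       |PySem.List.pyGetD r (i - 1) 0 - PySem.List.pyGetD r i 0| ≤ 3)) then false
          else dist) true =
      (r.zip r.tail).all (fun q => decide (1 ≤ |q.1 - q.2| ∧ |q.1 - q.2| ≤ 3)) := by
    rw [PySem.List.foldl_if_false_eq
      (p := fun i => !(decide (1 ≤ |PySem.List.pyGetD r (i - 1) 0 - PySem.List.pyGetD r i 0| ∧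
                               |PySem.List.pyGetD r (i - 1) 0 - PySem.List.pyGetD r i 0| ≤ 3)))]
    rw [Bool.true_and, ← List.all_eq_not_any_not]
    exact range_adj (fun x y => decide (1 ≤ |x - y| ∧ |x - y| ≤ 3)) r
  unfold valid_list
  rw [hloop]
  have hif : ∀ (c : Bool) (x : Bool), (if !c then false else x) = (c && x) := by
    intro c x; cases c <;> simp
  rw [hif]
  rw [sortedAsc_eq, sortedDesc_eq]
  have hdesc : decide (r.Pairwise (fun a b => b ≤ a)) =
      (r.zip r.tail).all (fun q => decide (q.2 ≤ q.1)) := by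
    rw [zip_all_isChain (fun a b => b ≤ a) r]
    haveI : Trans (fun (a b : Int) => b ≤ a) (fun (a b : Int) => b ≤ a) (fun (a b : Int) => b ≤ a) :=
      { trans := fun h1 h2 => le_trans h2 h1 }
    rw [decide_eq_decide]
    exact List.isChain_iff_pairwise.symm
  have hasc : decide (r.Pairwise (fun a b : Int => a ≤ b)) =
      (r.zip r.tail).all (fun q => decide (q.1 ≤ q.2)) := by
    rw [zip_all_isChain (fun a b => a ≤ b) r]
    rw [decide_eq_decide]
    exact List.isChain_iff_pairwise.symm
  rw [hdesc, hasc]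
  conv_lhs => rw [Bool.or_comm]
  unfold pvOk pvDiffs
  rw [List.all_map, List.all_map]
  rw [Bool.and_or_distrib_right, ← all_and_split, ← all_and_split]
  congr 1
  · apply all_congr_mem'
    intro x _
    simp only [Function.comp_apply, ← Bool.decide_and, decide_eq_decide]
    rcases abs_cases (x.1 - x.2) with ⟨h, _⟩ | ⟨h, _⟩ <;> rw [h] <;> omega
  · apply all_congr_mem'
    intro x _
    simp only [Function.comp_apply, ← Bool.decide_and, decide_eq_decide]
    rcases abs_cases (x.1 - x.2) with ⟨h, _⟩ | ⟨h, _⟩ <;> rw [h] <;> omega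

theorem two_star_fold_eq (l : List (List Int)) :
    two_star l = two_star_alt l := by
  unfold two_star two_star_alt
  apply PySem.List.foldl_congr_mem
  intro valid r _
  simp only [PySem.List.slice_from_one]
  have hres :
      (PySem.List.pyRange 0 (r.length : Int)).foldl
        (fun res j =>
          let cp := match PySem.List.pop? r j with
                    | some (_, rest) => rest
                    | none => r
          res ++ [valid_list cp]) [] =
      (PySem.List.pyRange 0 (r.length : Int)).map
        (fun j => valid_list (match PySem.List.pop? r j with
                              | some (_, rest) => rest
                              | none => r)) := by
    exact PySem.List.foldl_append_singleton_eq_map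
      (f := fun j => valid_list (match PySem.List.pop? r j with
                                 | some (_, rest) => rest
                                 | none => r)) _ []
  simp only [hres]
  have hcontains : ∀ (xs : List Int) (f : Int → Bool),
      (xs.map f).contains true = xs.any f := by
    intro xs f
    rw [List.contains_eq_any_beq, List.any_map]
    apply PySem.List.any_congr_mem
    intro x _
    simp
  rw [hcontains]
  have hd : (r.zip r.tail).map (fun p => p.2 - p.1) = pvDiffs r := rfl
  rw [hd]
  have hany :
      (PySem.List.pyRange 0 (r.length : Int)).any
        (fun j => valid_list (match PySem.List.pop? r j with
                              | some (_, rest) => rest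
                              | none => r)) =
      (PySem.List.pyRange 0 (r.length : Int)).any (fun k => pvOk (pvDrop (pvDiffs r) k)) := by
    apply PySem.List.any_congr_mem
    intro j hj
    rw [PySem.List.mem_pyRange_one] at hj
    obtain ⟨hj0, hjlen⟩ := hj
    obtain ⟨n, rfl⟩ : ∃ n : Nat, j = (n : Int) := ⟨j.toNat, (Int.toNat_of_nonneg hj0).symm⟩
    have hn : n < r.length := by exact_mod_cast hjlen
    rw [PySem.List.pop?_natCast r n hn]
    simp only []
    rw [valid_list_eq_pvOk, pvDiffs_eraseIdx r n hn, pvDrop_natCast]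
  rw [hany, valid_list_eq_pvOk]
  cases h1 : pvOk (pvDiffs r) <;>
    cases h2 : (PySem.List.pyRange 0 (r.length : Int)).any (fun k => pvOk (pvDrop (pvDiffs r) k)) <;>
    simp

-- ===== VERDICT (by name: the statement is the Claim_ definition above) =====
theorem two_star_spec : Claim_equal_two_star := by
  intro l _
  unfold Spec_two_star
  exact two_star_fold_eq l
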